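-- pv_equiv track=rewrite | github.com/Mr-What/Tetra3D | tools/extract_bed_probe.py | extract_cfg_block_from_log
-- ===== SOURCE A (Python) =====
-- def extract_cfg_block_from_log(log_lines):
--     """
--     Klipper writes the full printer.cfg into the log at every startup,
--     surrounded by:
--         ===== Config file =====
--         ...
--         =======================
--
--     There may be multiple sessions in one log file (Klipper restarts).
--     Return the lines of the LAST such block, excluding the delimiter lines.
--     """
--     START = '===== Config file ====='
--     END   = '======================='
--
--     last_block_lines = []
--     in_block = False
--     current_block = []
--
--     for line in log_lines:
--         s = line.strip()
--         if s == START: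
--             in_block = True
--             current_block = []
--             continue
--         if s == END and in_block:
--             in_block = False
--             last_block_lines = current_block[:]
--             continue
--         if in_block:
--             current_block.append(line)
--
--     return last_block_lines
-- ===== SOURCE B (Python) =====
-- def extract_cfg_block_from_log(log_lines):
--     """Reverse scan: find the last completed config block directly and stop early."""
--     START = '===== Config file ====='
--     END   = '======================='
--     in_block = False
--     buf = []
--     for line in reversed(log_lines):
--         s = line.strip()
--         if s == END:
--             in_block = True
--             buf = []
--         elif s == START and in_block:
--             return list(reversed(buf))
--         elif in_block:
--             buf.append(line)
--     return []
-- ===== Notes on version B (the rewrite author's own statement) =====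
-- stated objective: alternative
-- what changed: B scans the lines in reverse with swapped delimiter roles (END opens, START closes) and returns as soon as the last completed block is found, instead of A's forward state machine that keeps overwriting last_block_lines.
import Mathlib
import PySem

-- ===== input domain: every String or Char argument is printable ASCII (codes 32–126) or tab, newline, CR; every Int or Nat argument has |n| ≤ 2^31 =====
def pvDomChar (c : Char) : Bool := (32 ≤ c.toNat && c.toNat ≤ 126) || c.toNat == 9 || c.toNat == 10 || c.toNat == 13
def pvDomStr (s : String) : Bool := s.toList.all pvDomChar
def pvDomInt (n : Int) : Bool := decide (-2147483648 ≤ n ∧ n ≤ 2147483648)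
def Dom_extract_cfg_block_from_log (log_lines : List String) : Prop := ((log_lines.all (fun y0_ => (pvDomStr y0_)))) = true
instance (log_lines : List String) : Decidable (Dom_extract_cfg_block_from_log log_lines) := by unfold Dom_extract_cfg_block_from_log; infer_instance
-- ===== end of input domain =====

-- B scans the log in reverse with swapped delimiter roles and stops at the last completed block; same return value, different decomposition.

-- ===== PORT A =====
def pvStart : String := "===== Config file ====="
def pvEnd : String := "======================="

-- step of A's forward loop; state = (last_block_lines, in_block, current_block)
def extractGoA (st : List String × Bool × List String) (line : String) : List String × Bool × List String :=
  let s := PySem.Str.strip line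
  if s = pvStart then (st.1, true, [])
  else if s = pvEnd ∧ st.2.1 = true then (st.2.2, false, st.2.2)
  else if st.2.1 = true then (st.1, st.2.1, st.2.2 ++ [line])
  else st

def extract_cfg_block_from_log (log_lines : List String) : List String :=
  (log_lines.foldl extractGoA ([], false, [])).1

-- ===== PORT B =====
-- B's reverse loop: END opens the candidate block, START (while open) ends the scan
def extractRevGo : List String → Bool → List String → List String
  | [], _, _ => []
  | line :: rest, inb, buf =>
    let s := PySem.Str.strip line
    if s = pvEnd then extractRevGo rest true []
    else if s = pvStart ∧ inb = true then buf.reverse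
    else if inb = true then extractRevGo rest inb (buf ++ [line])
    else extractRevGo rest inb buf

def extract_cfg_block_from_log_alt (log_lines : List String) : List String :=
  extractRevGo log_lines.reverse false []

-- ===== PRECONDITION & SPEC =====
def Spec_extract_cfg_block_from_log (log_lines : List String) (out : List String) : Prop := out = extract_cfg_block_from_log_alt log_lines
instance (log_lines : List String) (out : List String) : Decidable (Spec_extract_cfg_block_from_log log_lines out) := by unfold Spec_extract_cfg_block_from_log; infer_instance

-- ===== CLAIM (what is proved, stated in full; the proofs are below) =====
def Claim_equal_extract_cfg_block_from_log : Prop := ∀ (log_lines : List String), Dom_extract_cfg_block_from_log log_lines → Spec_extract_cfg_block_from_log log_lines (extract_cfg_block_from_log log_lines)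

-- ===== LEMMAS AND PROOFS =====

-- invariant tying B's reverse scan on l.reverse to A's forward fold state on l
lemma extract_key (l : List String) :
    (∀ buf, extractRevGo l.reverse false buf = (l.foldl extractGoA ([], false, [])).1) ∧
    (∀ buf, extractRevGo l.reverse true buf =
      if (l.foldl extractGoA ([], false, [])).2.1 = true
      then (l.foldl extractGoA ([], false, [])).2.2 ++ buf.reverse
      else (l.foldl extractGoA ([], false, [])).1) := by
  have hne : ¬ (pvEnd = pvStart) := by decide
  induction l using List.reverseRecOn with
  | nil => simp [extractRevGo]
  | append_singleton l x ih =>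
    obtain ⟨ih1, ih2⟩ := ih
    have hrev : (l ++ [x]).reverse = x :: l.reverse := by simp
    have hfold : (l ++ [x]).foldl extractGoA ([], false, []) =
        extractGoA (l.foldl extractGoA ([], false, [])) x := by
      simp [List.foldl_append]
    by_cases hS : PySem.Str.strip x = pvStart
    · have hE : ¬ PySem.Str.strip x = pvEnd := by rw [hS]; decide
      constructor
      · intro buf
        rw [hrev]
        simp only [extractRevGo]
        rw [if_neg hE, if_neg (by simp), if_neg (by simp), ih1]
        simp [hfold, extractGoA, hS]
      · intro buf
        rw [hrev]
        simp only [extractRevGo]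
        rw [if_neg hE, if_pos ⟨hS, trivial⟩]
        simp [hfold, extractGoA, hS]
    · by_cases hE : PySem.Str.strip x = pvEnd
      · constructor <;> intro buf <;> rw [hrev] <;> simp only [extractRevGo] <;>
          rw [if_pos hE, ih2] <;>
          cases hb : (l.foldl extractGoA ([], false, [])).2.1 <;>
          simp [hfold, extractGoA, hE, hb, hne]
      · constructor
        · intro buf
          rw [hrev]
          simp only [extractRevGo]
          rw [if_neg hE, if_neg (by simp [hS]), if_neg (by simp), ih1]
          cases hb : (l.foldl extractGoA ([], false, [])).2.1 <;>
            simp [hfold, extractGoA, hS, hE, hb]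
        · intro buf
          rw [hrev]
          simp only [extractRevGo]
          rw [if_neg hE, if_neg (by simp [hS]), if_pos trivial]
          rw [ih2]
          cases hb : (l.foldl extractGoA ([], false, [])).2.1 <;>
            simp [hfold, extractGoA, hS, hE, hb]

-- ===== VERDICT (by name: the statement is the Claim_ definition above) =====
theorem extract_cfg_block_from_log_spec : Claim_equal_extract_cfg_block_from_log := by
  intro log_lines _
  unfold Spec_extract_cfg_block_from_log extract_cfg_block_from_log extract_cfg_block_from_log_alt
  exact ((extract_key log_lines).1 []).symm
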